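-- pv_equiv track=rewrite | github.com/andreasvc/adventofcode | 2025/adventofcode.py | day4
-- ===== SOURCE A (Python) =====
-- def day4(s):
-- 	rolls = {(y, x)
-- 			for y, line in enumerate(s.splitlines())
-- 			for x, c in enumerate(line)
-- 			if c == '@'}
-- 	dirs = ((-1, 0), (1, 0), (0, -1), (0, 1),
-- 			(-1, -1), (1, 1), (1, -1), (-1, 1))
-- 	result1 = sum(
-- 			sum((y + dy, x + dx) in rolls
-- 				for dy, dx in dirs)
-- 			< 4
-- 			for y, x in rolls)
-- 	result2 = 0
-- 	while True:
-- 		remove = {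
-- 			(y, x) for y, x in rolls
-- 			if sum((y + dy, x + dx) in rolls
-- 				for dy, dx in dirs) < 4}
-- 		if not remove:
-- 			break
-- 		rolls -= remove
-- 		result2 += len(remove)
-- 	return result1, result2
-- ===== SOURCE B (Python) =====
-- def day4(s):
-- 	dirs = ((-1, 0), (1, 0), (0, -1), (0, 1),
-- 			(-1, -1), (1, 1), (1, -1), (-1, 1))
-- 	rolls = {(y, x)
-- 			for y, line in enumerate(s.splitlines())
-- 			for x, c in enumerate(line)
-- 			if c == '@'}
-- 	deg = {}
-- 	for y, x in rolls:
-- 		deg[y, x] = sum((y + dy, x + dx) in rolls for dy, dx in dirs)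
-- 	queue = [c for c in rolls if deg[c] < 4]
-- 	result1 = len(queue)
-- 	present = set(rolls)
-- 	removed = 0
-- 	i = 0
-- 	while i < len(queue):
-- 		y, x = queue[i]
-- 		i += 1
-- 		if (y, x) not in present:
-- 			continue
-- 		present.discard((y, x))
-- 		removed += 1
-- 		for dy, dx in dirs:
-- 			n = (y + dy, x + dx)
-- 			if n in present:
-- 				deg[n] -= 1
-- 				if deg[n] == 3:
-- 					queue.append(n)
-- 	return result1, removed
-- ===== Notes on version B (the rewrite author's own statement) =====
-- stated objective: alternative
-- what changed: replaces the round-based fixpoint peeling (recomputing every cell's neighbor count each round until no round removes anything) by queue-based incremental peeling: neighbor counts are computed once, then each removal decrements its neighbors' counts locally and enqueues cells whose count drops below 4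
import Mathlib
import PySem

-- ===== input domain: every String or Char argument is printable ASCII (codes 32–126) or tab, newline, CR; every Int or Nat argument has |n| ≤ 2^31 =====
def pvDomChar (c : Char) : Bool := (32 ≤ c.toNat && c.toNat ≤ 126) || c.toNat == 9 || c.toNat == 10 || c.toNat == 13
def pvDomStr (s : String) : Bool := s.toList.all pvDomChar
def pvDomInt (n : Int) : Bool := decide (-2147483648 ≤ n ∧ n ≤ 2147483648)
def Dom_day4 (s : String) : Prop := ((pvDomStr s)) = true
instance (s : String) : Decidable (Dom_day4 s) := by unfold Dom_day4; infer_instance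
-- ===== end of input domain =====

-- B replaces A's round-based fixpoint peeling by queue-based incremental peeling (neighbor
-- counts computed once, decremented locally on removal): a different algorithm, same results.

-- shared by both ports: both Python sources contain this same set comprehension,
-- the same dirs tuple and the same 8-neighbor membership sum.
def pvDirs : List (Int × Int) :=
  [(-1, 0), (1, 0), (0, -1), (0, 1), (-1, -1), (1, 1), (1, -1), (-1, 1)]

def pvRolls (s : String) : PySem.Set (Int × Int) :=
  PySem.Set.ofList
    ((PySem.List.enumerate (PySem.Str.splitlines s)).flatMap (fun yl =>
      ((PySem.List.enumerate yl.2.toList).filter (fun xc => xc.2 == '@')).map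
        (fun xc => (yl.1, xc.1))))

-- sum((y + dy, x + dx) in rolls for dy, dx in dirs)
def pvCnt (rolls : List (Int × Int)) (c : Int × Int) : Int :=
  (pvDirs.map (fun d => if (c.1 + d.1, c.2 + d.2) ∈ rolls then (1 : Int) else 0)).sum

-- ===== PORT A =====
-- the remove-set computed at the top of each round of A's while loop
def pvRemove (rolls : PySem.Set (Int × Int)) : PySem.Set (Int × Int) :=
  PySem.Set.ofList (rolls.filter (fun c => decide (pvCnt rolls c < 4)))

-- termination of A's loop: a nonempty remove-set strictly shrinks rolls
theorem pv_diff_remove_lt (rolls : List (Int × Int)) (h : pvRemove rolls ≠ []) :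
    (PySem.Set.diff rolls (pvRemove rolls)).length < rolls.length := by
  rcases List.exists_mem_of_ne_nil _ h with ⟨r, hrm⟩
  have hrr : r ∈ rolls :=
    List.mem_of_mem_filter ((PySem.Set.mem_ofList _ _).1 hrm)
  simp only [PySem.Set.diff]
  apply List.length_filter_lt_length_iff_exists.2
  refine ⟨r, hrr, ?_⟩
  simp only [PySem.Set.contains_eq_listContains, Bool.not_eq_true', Bool.not_eq_false]
  exact List.elem_iff.2 hrm

-- the 'while True' peeling loop of A
def day4loopA (rolls : PySem.Set (Int × Int)) (result2 : Int) : Int :=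
  let remove := pvRemove rolls
  if remove = [] then result2
  else day4loopA (PySem.Set.diff rolls remove) (result2 + remove.length)
termination_by rolls.length
decreasing_by
  rename_i h
  exact pv_diff_remove_lt rolls h

def day4 (s : String) : Int × Int :=
  let rolls := pvRolls s
  let result1 := (rolls.map (fun c => if pvCnt rolls c < 4 then (1 : Int) else 0)).sum
  (result1, day4loopA rolls 0)

-- ===== PORT B =====
-- body of B's inner 'for dy, dx in dirs' loop: state = (deg, queue-still-to-process)
def pvStep (present : PySem.Set (Int × Int))
    (st : PySem.Dict (Int × Int) Int × List (Int × Int)) (n : Int × Int) :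
    PySem.Dict (Int × Int) Int × List (Int × Int) :=
  if n ∈ present then
    let dg := st.1.modify n 0 (· - 1)   -- key n always present in deg: n ∈ rolls
    if dg.getD n 0 == 3 then (dg, st.2 ++ [n]) else (dg, st.2)
  else st

-- the fold only appends to the queue (used for termination of day4altLoop)
theorem pvStep_len_le (present : PySem.Set (Int × Int)) (c : Int × Int) :
    ∀ (ns : List (Int × Int)) (st : PySem.Dict (Int × Int) Int × List (Int × Int)),
      (ns.foldl (fun st d => pvStep present st (c.1 + d.1, c.2 + d.2)) st).2.length
        ≤ st.2.length + ns.length := by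
  intro ns
  induction ns with
  | nil => simp
  | cons n tl ih =>
    intro st
    have h1 : (pvStep present st (c.1 + n.1, c.2 + n.2)).2.length ≤ st.2.length + 1 := by
      simp only [pvStep]
      split
      · split <;> simp
      · simp
    calc (List.foldl (fun st d => pvStep present st (c.1 + d.1, c.2 + d.2)) st (n :: tl)).2.length
        ≤ (pvStep present st (c.1 + n.1, c.2 + n.2)).2.length + tl.length := ih _
      _ ≤ st.2.length + (n :: tl).length := by simp only [List.length_cons]; omega

-- B's 'while i < len(queue)' loop: pending = queue[i:], appends go to pending's end
def day4altLoop (pending : List (Int × Int)) (present : PySem.Set (Int × Int))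
    (deg : PySem.Dict (Int × Int) Int) (removed : Int) : Int :=
  match pending with
  | [] => removed
  | c :: rest =>
    if h : c ∈ present then
      let present' := present.discard c
      let st := pvDirs.foldl (fun st d => pvStep present' st (c.1 + d.1, c.2 + d.2)) (deg, rest)
      day4altLoop st.2 present' st.1 (removed + 1)
    else
      day4altLoop rest present deg removed
termination_by 9 * present.length + pending.length
decreasing_by
  · have hlt : (PySem.Set.discard present c).length < present.length := by
      simp only [PySem.Set.discard]
      apply List.length_filter_lt_length_iff_exists.2
      exact ⟨c, h, by simp⟩
    have h8 : (List.foldl (fun st d => pvStep (present.discard c) st (c.1 + d.1, c.2 + d.2))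
        (deg, rest) pvDirs).2.length ≤ rest.length + pvDirs.length := by
      simpa using pvStep_len_le (PySem.Set.discard present c) c pvDirs (deg, rest)
    have h9 : pvDirs.length = 8 := rfl
    simp only [List.length_cons]
    omega
  · simp only [List.length_cons]; omega

def day4_alt (s : String) : Int × Int :=
  let rolls := pvRolls s
  let deg : PySem.Dict (Int × Int) Int := rolls.foldl (fun d c => d.insert c (pvCnt rolls c)) PySem.Dict.empty
  let queue := rolls.filter (fun c => decide (deg.getD c 0 < 4))   -- deg[c] exists: c ∈ rolls
  ((queue.length : Int), day4altLoop queue rolls deg 0)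

-- ===== PRECONDITION & SPEC =====
def Spec_day4 (s : String) (out : Int × Int) : Prop := out = day4_alt s
instance (s : String) (out : Int × Int) : Decidable (Spec_day4 s out) := by unfold Spec_day4; infer_instance

-- ===== CLAIM (what is proved, stated in full; the proofs are below) =====
def Claim_equal_day4 : Prop := ∀ (s : String), Dom_day4 s → Spec_day4 s (day4 s)

-- ===== LEMMAS AND PROOFS =====

-- the 8 neighbour positions of a cell
def pvNbrs (c : Int × Int) : List (Int × Int) := pvDirs.map (fun d => (c.1 + d.1, c.2 + d.2))

-- "P is the core of base": P ⊆ base, every cell of P has ≥ 4 neighbours in P,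
-- and P contains every subset of base with that property
def IsCore (base P : List (Int × Int)) : Prop :=
  P.Nodup ∧ (∀ x ∈ P, x ∈ base) ∧ (∀ c ∈ P, ¬ pvCnt P c < 4) ∧
    (∀ T : List (Int × Int), (∀ c ∈ T, ¬ pvCnt T c < 4) → (∀ x ∈ T, x ∈ base) → ∀ x ∈ T, x ∈ P)

theorem cnt_eq_countP (S : List (Int × Int)) (c : Int × Int) :
    pvCnt S c = ((pvNbrs c).countP (fun n => decide (n ∈ S)) : Int) := by
  rw [pvCnt, pvNbrs, List.countP_map]
  simp only [Function.comp_def]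
  rw [← PySem.List.sum_map_ite_one_zero
    (fun d : Int × Int => decide (((c.1 + d.1, c.2 + d.2) : Int × Int) ∈ S)) pvDirs]
  simp

theorem cnt_mono {S T : List (Int × Int)} (h : ∀ x, x ∈ S → x ∈ T) (c : Int × Int) :
    pvCnt S c ≤ pvCnt T c := by
  rw [cnt_eq_countP, cnt_eq_countP]
  exact_mod_cast List.countP_mono_left (fun x _ hx => by simp at hx ⊢; exact h x hx)

theorem nbrs_nodup (c : Int × Int) : (pvNbrs c).Nodup := by
  apply List.Nodup.map_on
  · intro x _ y _ hxy
    have h1 : c.1 + x.1 = c.1 + y.1 := congrArg Prod.fst hxy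
    have h2 : c.2 + x.2 = c.2 + y.2 := congrArg Prod.snd hxy
    exact Prod.ext (by omega) (by omega)
  · decide

theorem mem_nbrs_symm {c p : Int × Int} (h : c ∈ pvNbrs p) : p ∈ pvNbrs c := by
  rw [pvNbrs, List.mem_map] at h
  rcases h with ⟨d, hd, hdc⟩
  have hneg : ∀ d ∈ pvDirs, ((-d.1, -d.2) : Int × Int) ∈ pvDirs := by decide
  rw [pvNbrs, List.mem_map]
  refine ⟨(-d.1, -d.2), hneg d hd, ?_⟩
  have h1 : p.1 + d.1 = c.1 := congrArg Prod.fst hdc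
  have h2 : p.2 + d.2 = c.2 := congrArg Prod.snd hdc
  exact Prod.ext (by simp; omega) (by simp; omega)

-- counting over a duplicate-free list after deleting one element
theorem countP_and_ne (S : List (Int × Int)) (c : Int × Int) :
    ∀ ns : List (Int × Int), ns.Nodup →
      ((ns.countP (fun n => decide (n ∈ S ∧ n ≠ c)) : Int))
        = (ns.countP (fun n => decide (n ∈ S)) : Int)
          - (if c ∈ ns ∧ c ∈ S then 1 else 0) := by
  intro ns
  induction ns with
  | nil => simp
  | cons a tl ih =>
    intro hnd
    have hna : a ∉ tl := (List.nodup_cons.1 hnd).1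
    have htl := ih (List.nodup_cons.1 hnd).2
    by_cases hac : a = c
    · subst hac
      have hcong : tl.countP (fun n => decide (n ∈ S ∧ n ≠ a))
          = tl.countP (fun n => decide (n ∈ S)) := by
        apply List.countP_congr
        intro x hx
        have hxa : x ≠ a := fun he => hna (he ▸ hx)
        simp [hxa]
      rw [List.countP_cons, List.countP_cons, hcong]
      by_cases hcs : a ∈ S <;> simp [hcs, hna]
    · have hmem : c ∈ a :: tl ↔ c ∈ tl := by
        simp [List.mem_cons]
        intro he; exact absurd he.symm hac
      rw [List.countP_cons, List.countP_cons]
      by_cases has : a ∈ S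
      · have h1 : (decide (a ∈ S ∧ a ≠ c)) = true := by simp [has, hac]
        rw [h1]
        by_cases hc : c ∈ tl ∧ c ∈ S <;>
          simp [hc, has, hmem] at htl ⊢ <;> omega
      · have h1 : (decide (a ∈ S ∧ a ≠ c)) = false := by simp [has]
        rw [h1]
        by_cases hc : c ∈ tl ∧ c ∈ S <;>
          simp [hc, has, hmem] at htl ⊢ <;> omega

theorem cnt_discard (S : List (Int × Int)) (c p : Int × Int) :
    pvCnt (PySem.Set.discard S c) p
      = pvCnt S p - (if c ∈ pvNbrs p ∧ c ∈ S then 1 else 0) := by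
  rw [cnt_eq_countP, cnt_eq_countP]
  have hcong : (pvNbrs p).countP (fun n => decide (n ∈ PySem.Set.discard S c))
      = (pvNbrs p).countP (fun n => decide (n ∈ S ∧ n ≠ c)) := by
    apply List.countP_congr
    intro x _
    simp [PySem.Set.mem_discard]
  rw [hcong]
  exact countP_and_ne S c (pvNbrs p) (nbrs_nodup p)

theorem core_unique {base P Q : List (Int × Int)} (hP : IsCore base P) (hQ : IsCore base Q) :
    P.length = Q.length := by
  obtain ⟨hPn, hPs, hPc, hPm⟩ := hP
  obtain ⟨hQn, hQs, hQc, hQm⟩ := hQ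
  have hPQ : ∀ x ∈ P, x ∈ Q := hQm P hPc hPs
  have hQP : ∀ x ∈ Q, x ∈ P := hPm Q hQc hQs
  exact List.Perm.length_eq
    ((List.perm_ext_iff_of_nodup hPn hQn).2 (fun a => ⟨hPQ a, hQP a⟩))

-- members of the remove-set of a round
theorem mem_pvRemove {rolls : List (Int × Int)} {x : Int × Int} :
    x ∈ pvRemove rolls ↔ x ∈ rolls ∧ pvCnt rolls x < 4 := by
  rw [pvRemove, PySem.Set.mem_ofList, List.mem_filter]
  simp

-- A's loop reaches the core and counts the cells it removes
theorem loopA_spec_aux : ∀ (N : Nat) (rolls : List (Int × Int)) (acc : Int),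
    rolls.length ≤ N → rolls.Nodup →
    ∃ P, IsCore rolls P ∧ day4loopA rolls acc = acc + ((rolls.length : Int) - (P.length : Int)) := by
  intro N
  induction N with
  | zero =>
    intro rolls acc hlen _
    have : rolls = [] := List.eq_nil_of_length_eq_zero (Nat.le_zero.1 hlen)
    subst this
    refine ⟨[], ⟨List.nodup_nil, by simp, by simp, fun T _ hT x hx => absurd (hT x hx) (by simp)⟩, ?_⟩
    rw [day4loopA]
    simp [pvRemove, PySem.Set.ofList]
  | succ n ih =>
    intro rolls acc hlen hnd
    rw [day4loopA]
    by_cases h : pvRemove rolls = []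
    · simp only [h, if_true]
      refine ⟨rolls, ⟨hnd, fun x hx => hx, ?_, fun T _ hT x hx => hT x hx⟩, by ring⟩
      intro c hc hc4
      have : c ∈ pvRemove rolls := mem_pvRemove.2 ⟨hc, hc4⟩
      simp [h] at this
    · simp only [h, if_false]
      set rolls' := PySem.Set.diff rolls (pvRemove rolls) with hr'
      have hlt : rolls'.length < rolls.length := pv_diff_remove_lt rolls h
      have hnd' : rolls'.Nodup := by
        rw [hr', PySem.Set.diff]; exact hnd.filter _
      have hmem' : ∀ x, x ∈ rolls' ↔ x ∈ rolls ∧ ¬ pvCnt rolls x < 4 := by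
        intro x
        rw [hr', PySem.Set.diff, List.mem_filter]
        simp only [PySem.Set.contains_eq_listContains, Bool.not_eq_true',
          List.contains_eq_mem, decide_eq_false_iff_not]
        constructor
        · rintro ⟨hx, hnr⟩
          exact ⟨hx, fun h4 => hnr (mem_pvRemove.2 ⟨hx, h4⟩)⟩
        · rintro ⟨hx, h4⟩
          exact ⟨hx, fun hr => h4 (mem_pvRemove.1 hr).2⟩
      obtain ⟨P, hcore, hval⟩ := ih rolls' (acc + ((pvRemove rolls).length : Int))
        (by omega) hnd'
      obtain ⟨hPn, hPs, hPc, hPm⟩ := hcore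
      refine ⟨P, ⟨hPn, fun x hx => ((hmem' x).1 (hPs x hx)).1, hPc, ?_⟩, ?_⟩
      · intro T hTc hTs x hx
        refine hPm T hTc ?_ x hx
        intro y hy
        refine (hmem' y).2 ⟨hTs y hy, fun h4 => ?_⟩
        exact hTc y hy (lt_of_le_of_lt (cnt_mono hTs y) h4)
      · -- |remove| + |rolls'| = |rolls|
        have hrm : pvRemove rolls = rolls.filter (fun c => decide (pvCnt rolls c < 4)) := by
          rw [pvRemove]
          exact PySem.Set.ofList_eq_self_of_nodup _ (hnd.filter _)
        have hdiff : rolls' = rolls.filter (fun c => !(decide (pvCnt rolls c < 4))) := by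
          rw [hr', PySem.Set.diff]
          apply List.filter_congr
          intro x hx
          simp only [PySem.Set.contains_eq_listContains,
            List.contains_eq_mem, hrm, List.mem_filter, hx, true_and]
          by_cases h4 : pvCnt rolls x < 4 <;> simp [h4]
        have hsum : rolls.length = (pvRemove rolls).length + rolls'.length := by
          rw [hrm, hdiff]
          exact List.length_eq_length_filter_add _
        rw [hval]
        push_cast [hsum]
        ring

theorem loopA_spec (rolls : List (Int × Int)) (acc : Int) (hnd : rolls.Nodup) :
    ∃ P, IsCore rolls P ∧ day4loopA rolls acc = acc + ((rolls.length : Int) - (P.length : Int)) :=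
  loopA_spec_aux rolls.length rolls acc (le_refl _) hnd

-- characterization of B's inner dirs-fold
theorem fold_step_spec (pr : List (Int × Int)) :
    ∀ (ns : List (Int × Int)), ns.Nodup →
    ∀ (deg : PySem.Dict (Int × Int) Int) (q : List (Int × Int)),
      (∀ p, (ns.foldl (pvStep pr) (deg, q)).1.getD p 0
        = deg.getD p 0 - (if p ∈ ns ∧ p ∈ pr then 1 else 0)) ∧
      (ns.foldl (pvStep pr) (deg, q)).2
        = q ++ ns.filter (fun n => decide (n ∈ pr) && (deg.getD n 0 == 4)) := by
  intro ns
  induction ns with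
  | nil => intro _ deg q; simp
  | cons n tl ih =>
    intro hnd deg q
    have hn_tl : n ∉ tl := (List.nodup_cons.1 hnd).1
    have htl := ih (List.nodup_cons.1 hnd).2
    rw [List.foldl_cons]
    by_cases hn : n ∈ pr
    · have hdgget : ∀ p, (deg.modify n 0 (· - 1)).getD p 0
          = if p = n then deg.getD n 0 - 1 else deg.getD p 0 := by
        intro p; rw [PySem.Dict.getD_modify]
      have hstep : pvStep pr (deg, q) n
          = (if deg.getD n 0 = 4
              then (deg.modify n 0 (· - 1), q ++ [n])
              else (deg.modify n 0 (· - 1), q)) := by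
        simp only [pvStep, hn, if_pos]
        rw [hdgget n]
        simp only [if_true]
        by_cases h4 : deg.getD n 0 = 4
        · have : (deg.getD n 0 - 1 == 3) = true := by simp [h4]
          simp [h4]
        · have : (deg.getD n 0 - 1 == 3) = false := by
            simp only [beq_eq_false_iff_ne, ne_eq]; omega
          simp [this, h4]
      rw [hstep]
      have hmain : ∀ q' : List (Int × Int),
          (∀ p, (tl.foldl (pvStep pr) (deg.modify n 0 (· - 1), q')).1.getD p 0
            = deg.getD p 0 - (if p ∈ n :: tl ∧ p ∈ pr then 1 else 0)) ∧
          (tl.foldl (pvStep pr) (deg.modify n 0 (· - 1), q')).2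
            = q' ++ tl.filter (fun m => decide (m ∈ pr) && (deg.getD m 0 == 4)) := by
        intro q'
        obtain ⟨ihd, ihq⟩ := htl (deg.modify n 0 (· - 1)) q'
        constructor
        · intro p
          rw [ihd p, hdgget p]
          by_cases hp : p = n
          · subst hp
            simp [hn_tl, hn]
          · simp [hp, List.mem_cons]
        · rw [ihq]
          congr 1
          apply List.filter_congr
          intro m hm
          have hmn : m ≠ n := fun he => hn_tl (he ▸ hm)
          rw [hdgget m, if_neg hmn]
      by_cases h4 : deg.getD n 0 = 4
      · rw [if_pos h4]
        obtain ⟨hd, hq⟩ := hmain (q ++ [n])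
        refine ⟨hd, ?_⟩
        rw [hq, List.filter_cons]
        have : (decide (n ∈ pr) && (deg.getD n 0 == 4)) = true := by simp [hn, h4]
        rw [this]
        simp
      · rw [if_neg h4]
        obtain ⟨hd, hq⟩ := hmain q
        refine ⟨hd, ?_⟩
        rw [hq, List.filter_cons]
        have : (decide (n ∈ pr) && (deg.getD n 0 == 4)) = false := by simp [h4]
        rw [this]
        simp
    · have hstep : pvStep pr (deg, q) n = (deg, q) := by simp [pvStep, hn]
      rw [hstep]
      obtain ⟨ihd, ihq⟩ := htl deg q
      constructor
      · intro p
        rw [ihd p]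
        by_cases hp : p = n
        · subst hp; simp [hn]
        · simp [hp, List.mem_cons]
      · rw [ihq, List.filter_cons]
        have : (decide (n ∈ pr) && (deg.getD n 0 == 4)) = false := by simp [hn]
        rw [this]
        simp

-- a dict built by inserting f c for each c of a list
theorem getD_foldl_insert (f : (Int × Int) → Int) :
    ∀ (l : List (Int × Int)) (d : PySem.Dict (Int × Int) Int) (p : Int × Int),
      (l.foldl (fun d c => d.insert c (f c)) d).getD p 0
        = if p ∈ l then f p else d.getD p 0 := by
  intro l
  induction l with
  | nil => intro d p; simp
  | cons c tl ih =>
    intro d p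
    rw [List.foldl_cons, ih]
    by_cases hp : p ∈ tl
    · simp [hp]
    · rw [if_neg hp, PySem.Dict.getD_insert]
      by_cases hpc : p = c <;> simp [hp, hpc, List.mem_cons]

theorem deg_build (rolls : List (Int × Int)) (p : Int × Int) (h : p ∈ rolls) :
    (rolls.foldl (fun d c => d.insert c (pvCnt rolls c)) PySem.Dict.empty).getD p 0
      = pvCnt rolls p := by
  rw [getD_foldl_insert]
  simp [h]

-- B's loop also reaches the core and counts the cells it removes
theorem loopB_spec : ∀ (N : Nat) (pending present : List (Int × Int))
    (deg : PySem.Dict (Int × Int) Int) (removed : Int),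
    9 * present.length + pending.length ≤ N → present.Nodup →
    (∀ c ∈ present, deg.getD c 0 = pvCnt present c) →
    (∀ c ∈ present, pvCnt present c < 4 → c ∈ pending) →
    (∀ c ∈ pending, c ∈ present → pvCnt present c < 4) →
    ∃ P, IsCore present P ∧
      day4altLoop pending present deg removed
        = removed + ((present.length : Int) - (P.length : Int)) := by
  intro N
  induction N with
  | zero =>
    intro pending present deg removed hN hnd hI2 hI3 hI4
    have hp : pending = [] := List.eq_nil_of_length_eq_zero (by omega)
    subst hp
    rw [day4altLoop]
    exact ⟨present, ⟨hnd, fun x hx => hx,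
      fun c hc h4 => absurd (hI3 c hc h4) (by simp),
      fun T _ hT x hx => hT x hx⟩, by ring⟩
  | succ n ih =>
    intro pending present deg removed hN hnd hI2 hI3 hI4
    match pending, hN, hI3, hI4 with
    | [], hN, hI3, hI4 =>
      rw [day4altLoop]
      exact ⟨present, ⟨hnd, fun x hx => hx,
        fun c hc h4 => absurd (hI3 c hc h4) (by simp),
        fun T _ hT x hx => hT x hx⟩, by ring⟩
    | c :: rest, hN, hI3, hI4 =>
      rw [day4altLoop]
      by_cases h : c ∈ present
      · simp only [dif_pos h]
        have hmem_pr : ∀ x, x ∈ (PySem.Set.discard present c) ↔ x ∈ present ∧ x ≠ c :=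
          fun x => PySem.Set.mem_discard present c x
        have hsub : ∀ x ∈ (PySem.Set.discard present c), x ∈ present := fun x hx => ((hmem_pr x).1 hx).1
        have hnd' : ((PySem.Set.discard present c)).Nodup := PySem.Set.nodup_discard present c hnd
        have hlen' : ((PySem.Set.discard present c)).length + 1 = present.length := by
          have he : present.erase c = (PySem.Set.discard present c) := by
            rw [PySem.Set.discard]
            simpa [bne] using List.Nodup.erase_eq_filter hnd c
          have h1 : (present.erase c).length = present.length - 1 :=
            List.length_erase_of_mem h
          have hpos : 0 < present.length := List.length_pos_of_mem h
          rw [← he]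
          omega
        have hc4 : pvCnt present c < 4 := hI4 c List.mem_cons_self h
        have hfm : pvDirs.foldl (fun st d => pvStep ((PySem.Set.discard present c)) st (c.1 + d.1, c.2 + d.2)) (deg, rest)
            = (pvNbrs c).foldl (pvStep ((PySem.Set.discard present c))) (deg, rest) := by
          rw [pvNbrs, List.foldl_map]
        rw [hfm]
        obtain ⟨hd, hq⟩ := fold_step_spec ((PySem.Set.discard present c)) (pvNbrs c) (nbrs_nodup c) deg rest
        set st := (pvNbrs c).foldl (pvStep ((PySem.Set.discard present c))) (deg, rest) with hst
        -- how a cell's neighbour count changes when c is removed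
        have hcnt : ∀ p ∈ (PySem.Set.discard present c),
            pvCnt ((PySem.Set.discard present c)) p
              = pvCnt present p - (if p ∈ pvNbrs c then 1 else 0) := by
          intro p _
          rw [cnt_discard present c p]
          by_cases hnb : p ∈ pvNbrs c
          · have hnb' : c ∈ pvNbrs p := mem_nbrs_symm hnb
            simp [hnb, hnb', h]
          · have hnb' : c ∉ pvNbrs p := fun hx => hnb (mem_nbrs_symm hx)
            simp [hnb, hnb']
        have hI2' : ∀ p ∈ (PySem.Set.discard present c), st.1.getD p 0 = pvCnt ((PySem.Set.discard present c)) p := by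
          intro p hp
          rw [hd p, hI2 p (hsub p hp), hcnt p hp]
          by_cases hnb : p ∈ pvNbrs c <;> simp [hnb, hp]
        have hI3' : ∀ p ∈ (PySem.Set.discard present c), pvCnt ((PySem.Set.discard present c)) p < 4 → p ∈ st.2 := by
          intro p hp h4'
          rw [hq]
          by_cases hp4 : pvCnt present p < 4
          · have : p ∈ c :: rest := hI3 p (hsub p hp) hp4
            have hpc : p ≠ c := ((hmem_pr p).1 hp).2
            rcases List.mem_cons.1 this with he | hr
            · exact absurd he hpc
            · exact List.mem_append_left _ hr
          · apply List.mem_append_right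
            rw [hcnt p hp] at h4'
            have hnb : p ∈ pvNbrs c := by
              by_contra hnb
              simp [hnb] at h4'
              omega
            have h44 : pvCnt present p = 4 := by
              simp [hnb] at h4'
              omega
            apply List.mem_filter.2
            refine ⟨hnb, ?_⟩
            simp [hp, hI2 p (hsub p hp), h44]
        have hI4' : ∀ p ∈ st.2, p ∈ (PySem.Set.discard present c) → pvCnt ((PySem.Set.discard present c)) p < 4 := by
          intro p hpq hp
          rw [hq] at hpq
          rcases List.mem_append.1 hpq with hr | hf
          · have hp4 : pvCnt present p < 4 :=
              hI4 p (List.mem_cons_of_mem c hr) (hsub p hp)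
            rw [hcnt p hp]
            by_cases hnb : p ∈ pvNbrs c <;> simp [hnb] <;> omega
          · obtain ⟨hnb, hcond⟩ := List.mem_filter.1 hf
            simp only [Bool.and_eq_true, decide_eq_true_eq, beq_iff_eq] at hcond
            have h44 : pvCnt present p = 4 := by
              rw [← hI2 p (hsub p hp)]; exact hcond.2
            rw [hcnt p hp]
            simp [hnb]
            omega
        have hqlen : st.2.length ≤ rest.length + 8 := by
          rw [hq]
          have hfle : ((pvNbrs c).filter
              (fun m => decide (m ∈ (PySem.Set.discard present c)) && (deg.getD m 0 == 4))).length
                ≤ (pvNbrs c).length := List.length_filter_le _ _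
          have h8 : (pvNbrs c).length = 8 := rfl
          simp only [List.length_append]
          omega
        have hNle : 9 * ((PySem.Set.discard present c)).length + st.2.length ≤ n := by
          simp only [List.length_cons] at hN
          omega
        obtain ⟨P, ⟨hPn, hPs, hPc, hPm⟩, hval⟩ :=
          ih st.2 ((PySem.Set.discard present c)) st.1 (removed + 1) hNle hnd' hI2' hI3' hI4'
        refine ⟨P, ⟨hPn, fun x hx => hsub x (hPs x hx), hPc, ?_⟩, ?_⟩
        · intro T hTc hTs x hx
          apply hPm T hTc _ x hx
          intro y hy
          refine (hmem_pr y).2 ⟨hTs y hy, ?_⟩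
          rintro rfl
          exact hTc y hy (lt_of_le_of_lt (cnt_mono hTs y) hc4)
        · rw [hval]
          have : (((PySem.Set.discard present c)).length : Int) = (present.length : Int) - 1 := by
            omega
          rw [this]
          ring
      · simp only [dif_neg h]
        have hNle : 9 * present.length + rest.length ≤ n := by
          simp only [List.length_cons] at hN
          omega
        apply ih rest present deg removed hNle hnd hI2
        · intro p hp h4
          have : p ∈ c :: rest := hI3 p hp h4
          rcases List.mem_cons.1 this with he | hr
          · exact absurd (he ▸ hp) h
          · exact hr
        · intro p hp hpp
          exact hI4 p (List.mem_cons_of_mem c hp) hpp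

-- ===== VERDICT (by name: the statement is the Claim_ definition above) =====
theorem day4_spec : Claim_equal_day4 := by
  intro s _
  unfold Spec_day4
  show day4 s = day4_alt s
  rw [day4, day4_alt]
  set rolls := pvRolls s with hr
  have hnd : rolls.Nodup := by
    rw [hr, pvRolls]; exact PySem.Set.nodup_ofList _
  set deg := rolls.foldl (fun d c => d.insert c (pvCnt rolls c)) PySem.Dict.empty with hdeg
  set queue := rolls.filter (fun c => decide (deg.getD c 0 < 4)) with hqu
  have hI2 : ∀ c ∈ rolls, deg.getD c 0 = pvCnt rolls c := fun c hc => by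
    rw [hdeg]; exact deg_build rolls c hc
  have hr1 : (rolls.map (fun c => if pvCnt rolls c < 4 then (1 : Int) else 0)).sum
      = (queue.length : Int) := by
    rw [hqu]
    have hfc : rolls.filter (fun c => decide (deg.getD c 0 < 4))
        = rolls.filter (fun c => decide (pvCnt rolls c < 4)) :=
      List.filter_congr (fun x hx => by rw [hI2 x hx])
    rw [hfc, ← List.countP_eq_length_filter]
    rw [← PySem.List.sum_map_ite_one_zero (fun c => decide (pvCnt rolls c < 4)) rolls]
    simp
  have hI3 : ∀ c ∈ rolls, pvCnt rolls c < 4 → c ∈ queue := fun c hc h4 => by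
    rw [hqu]
    exact List.mem_filter.2 ⟨hc, by simp [hI2 c hc, h4]⟩
  have hI4 : ∀ c ∈ queue, c ∈ rolls → pvCnt rolls c < 4 := by
    intro c hc _
    rw [hqu] at hc
    obtain ⟨hcr, hdec⟩ := List.mem_filter.1 hc
    rw [hI2 c hcr] at hdec
    exact of_decide_eq_true hdec
  obtain ⟨P, hPcore, hvalA⟩ := loopA_spec rolls 0 hnd
  obtain ⟨Q, hQcore, hvalB⟩ := loopB_spec (9 * rolls.length + queue.length)
    queue rolls deg 0 (le_refl _) hnd hI2 hI3 hI4
  have hlen := core_unique hPcore hQcore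
  rw [Prod.ext_iff]
  exact ⟨hr1, by rw [hvalA, hvalB, hlen]⟩
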